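-- pv_equiv track=rewrite | github.com/arun-gg-1996/sokratic-lm | conversation/dean.py | _replace_latest_student_message
-- ===== SOURCE A (Python) =====
-- def _replace_latest_student_message(messages: list[dict], new_content: str) -> list[dict]:
--     """
--     Replace latest student message content so downstream retrieval/classification
--     runs on the selected topic text (instead of a numeric reply like '2').
--     """
--     patched = list(messages or [])
--     for i in range(len(patched) - 1, -1, -1):
--         msg = patched[i]
--         if msg.get("role") == "student":
--             new_msg = dict(msg)
--             new_msg["content"] = new_content
--             patched[i] = new_msg
--             break
--     return patched
-- ===== SOURCE B (Python) =====
-- def _replace_latest_student_message(messages: list[dict], new_content: str) -> list[dict]: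
--     """Forward single pass: record the index of every student message seen,
--     then patch the last recorded one."""
--     patched = list(messages or [])
--     idx = None
--     for i, msg in enumerate(patched):
--         if msg.get("role") == "student":
--             idx = i
--     if idx is not None:
--         patched[idx] = {**patched[idx], "content": new_content}
--     return patched
-- ===== Notes on version B (the rewrite author's own statement) =====
-- stated objective: alternative
-- what changed: Replaces the backward scan-with-break by a forward enumerate pass that records the last student index, then a separate patch step using dict unpacking instead of dict()+assignment.
import Mathlib
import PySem

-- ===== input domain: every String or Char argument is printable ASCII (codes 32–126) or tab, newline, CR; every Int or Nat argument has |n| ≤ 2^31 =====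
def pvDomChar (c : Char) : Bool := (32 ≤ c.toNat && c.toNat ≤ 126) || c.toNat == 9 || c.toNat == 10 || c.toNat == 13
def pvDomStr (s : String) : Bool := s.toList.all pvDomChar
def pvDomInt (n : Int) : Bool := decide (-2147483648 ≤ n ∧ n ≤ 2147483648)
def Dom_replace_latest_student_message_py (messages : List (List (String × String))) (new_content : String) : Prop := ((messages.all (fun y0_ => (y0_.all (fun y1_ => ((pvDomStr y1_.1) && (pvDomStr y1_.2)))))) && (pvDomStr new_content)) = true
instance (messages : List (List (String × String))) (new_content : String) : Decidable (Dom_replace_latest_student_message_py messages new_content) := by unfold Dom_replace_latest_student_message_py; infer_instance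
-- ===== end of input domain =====

-- One honest line: B scans forward once recording the last student index and patches it
-- afterwards, instead of A's backward scan with an immediate break (objective: alternative).

-- shared dict primitives (a message dict is an association list; lookup = first match,
-- assignment = PySem.Dict.insert: overwrite in place, new key appends — exact Python dict semantics)
def pvIsStudent (msg : List (String × String)) : Bool :=
  (PySem.Dict.mk msg).get? "role" == some "student"

-- dict(msg) copy + new_msg["content"] = nc  (also {**msg, "content": nc})
def pvPatchMsg (msg : List (String × String)) (nc : String) : List (String × String) :=
  ((PySem.Dict.mk msg).insert "content" nc).items

-- ===== PORT A =====
-- for i in range(len(patched)-1, -1, -1): … break   — structural recursion on i+1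
def pvALoop (nc : String) (patched : List (List (String × String))) : Nat → List (List (String × String))
  | 0 => patched
  | i + 1 =>
    let msg := patched.getD i []     -- patched[i], i < len(patched) by construction
    if pvIsStudent msg then patched.set i (pvPatchMsg msg nc)
    else pvALoop nc patched i

def replace_latest_student_message_py (messages : List (List (String × String))) (new_content : String) : List (List (String × String)) :=
  let patched := messages            -- list(messages or []) : value-equal copy
  pvALoop new_content patched patched.length

-- ===== PORT B =====
def replace_latest_student_message_py_alt (messages : List (List (String × String))) (new_content : String) : List (List (String × String)) :=
  let patched := messages            -- list(messages or [])
  let idx : Option Int :=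
    (PySem.List.enumerate patched 0).foldl
      (fun acc p => if pvIsStudent p.2 then some p.1 else acc) none
  match idx with
  | none => patched
  | some i => PySem.List.pySetD patched i (pvPatchMsg (PySem.List.pyGetD patched i []) new_content)

-- ===== PRECONDITION & SPEC =====
def Spec_replace_latest_student_message_py (messages : List (List (String × String))) (new_content : String) (out : List (List (String × String))) : Prop := out = replace_latest_student_message_py_alt messages new_content
instance (messages : List (List (String × String))) (new_content : String) (out : List (List (String × String))) : Decidable (Spec_replace_latest_student_message_py messages new_content out) := by unfold Spec_replace_latest_student_message_py; infer_instance

-- ===== CLAIM (what is proved, stated in full; the proofs are below) =====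
def Claim_equal_replace_latest_student_message_py : Prop := ∀ (messages : List (List (String × String))) (new_content : String), Dom_replace_latest_student_message_py messages new_content → Spec_replace_latest_student_message_py messages new_content (replace_latest_student_message_py messages new_content)

-- ===== LEMMAS AND PROOFS =====

-- B's fold over the first k enumerated elements
def pvF (p : List (List (String × String))) (k : Nat) : Option Int :=
  (PySem.List.enumerate (p.take k) 0).foldl
    (fun acc q => if pvIsStudent q.2 then some q.1 else acc) none

lemma pvF_succ (p : List (List (String × String))) (k : Nat) (hk : k < p.length) :
    pvF p (k + 1) = if pvIsStudent p[k] then some (k : Int) else pvF p k := by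
  unfold pvF
  rw [List.take_add_one, List.getElem?_eq_getElem hk,
      PySem.List.enumerate_append, List.foldl_append]
  simp [PySem.List.enumerate_cons, PySem.List.enumerate_nil, List.length_take, hk.le]

-- main invariant: A's backward loop on the first k positions equals B's locate-then-patch on them
lemma pvALoop_eq_pvF (nc : String) (p : List (List (String × String))) :
    ∀ k, k ≤ p.length →
      pvALoop nc p k =
        match pvF p k with
        | none => p
        | some i => PySem.List.pySetD p i (pvPatchMsg (PySem.List.pyGetD p i []) nc) := by
  intro k
  induction k with
  | zero => intro _; simp [pvALoop, pvF, PySem.List.enumerate_nil]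
  | succ k ih =>
    intro hk
    have hklt : k < p.length := hk
    rw [pvF_succ p k hklt, pvALoop]
    have hget : p.getD k [] = p[k] := List.getD_eq_getElem p [] hklt
    by_cases hs : pvIsStudent p[k]
    · simp only [hget, hs, if_pos]
      rw [PySem.List.pySetD_natCast, PySem.List.pyGetD_natCast]
      simp [List.getD_eq_getElem?_getD, List.getElem?_eq_getElem hklt]
    · simp only [hget, hs, if_neg, Bool.false_eq_true, not_false_iff]
      exact ih hklt.le

theorem pv_main (messages : List (List (String × String))) (new_content : String) :
    replace_latest_student_message_py messages new_content
      = replace_latest_student_message_py_alt messages new_content := by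
  unfold replace_latest_student_message_py replace_latest_student_message_py_alt
  have h := pvALoop_eq_pvF new_content messages messages.length le_rfl
  rw [h]
  unfold pvF
  rw [List.take_length]

-- ===== VERDICT (by name: the statement is the Claim_ definition above) =====
theorem replace_latest_student_message_py_spec : Claim_equal_replace_latest_student_message_py := by
  intro messages new_content _
  unfold Spec_replace_latest_student_message_py
  exact pv_main messages new_content
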